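-- pv_equiv track=rewrite | github.com/Morfildor/regcheck-api | scripts/catalog_audit.py | _singleton_family_rows
-- ===== SOURCE A (Python) =====
-- from collections import Counter, defaultdict
-- from collections.abc import Iterable, Iterator, Mapping
-- from typing import Any
--
-- def _singleton_family_rows(products: list[Mapping[str, Any]]) -> list[str]:
--     counts = Counter(str(product.get("product_family") or "unknown") for product in products)
--     findings: list[str] = []
--     for product in products:
--         family = str(product.get("product_family") or "unknown")
--         if counts[family] != 1:
--             continue
--         findings.append(f"{family}: {product['id']}")
--     return sorted(findings)
-- ===== SOURCE B (Python) =====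
-- from collections.abc import Mapping
-- from typing import Any
--
--
-- def _singleton_family_rows(products: list[Mapping[str, Any]]) -> list[str]:
--     def fam(p: Mapping[str, Any]) -> str:
--         return str(p.get("product_family") or "unknown")
--
--     ordered = sorted(products, key=fam)
--     findings: list[str] = []
--     i, n = 0, len(ordered)
--     while i < n:
--         f = fam(ordered[i])
--         j = i + 1
--         while j < n and fam(ordered[j]) == f:
--             j += 1
--         if j - i == 1:
--             findings.append(f"{f}: {ordered[i]['id']}")
--         i = j
--     return sorted(findings)
-- ===== Notes on version B (the rewrite author's own statement) =====
-- stated objective: alternative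
-- what changed: B replaces A's Counter-plus-second-pass-over-all-products with a sort-then-scan: it sorts the products by family key once and walks the sorted list splitting it into runs of equal family, emitting a row exactly for runs of length 1; no frequency table is built.
-- outside the precondition, e.g. on _singleton_family_rows([{'product_family': 'a'}]): A raises KeyError, B raises KeyError
import Mathlib
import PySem

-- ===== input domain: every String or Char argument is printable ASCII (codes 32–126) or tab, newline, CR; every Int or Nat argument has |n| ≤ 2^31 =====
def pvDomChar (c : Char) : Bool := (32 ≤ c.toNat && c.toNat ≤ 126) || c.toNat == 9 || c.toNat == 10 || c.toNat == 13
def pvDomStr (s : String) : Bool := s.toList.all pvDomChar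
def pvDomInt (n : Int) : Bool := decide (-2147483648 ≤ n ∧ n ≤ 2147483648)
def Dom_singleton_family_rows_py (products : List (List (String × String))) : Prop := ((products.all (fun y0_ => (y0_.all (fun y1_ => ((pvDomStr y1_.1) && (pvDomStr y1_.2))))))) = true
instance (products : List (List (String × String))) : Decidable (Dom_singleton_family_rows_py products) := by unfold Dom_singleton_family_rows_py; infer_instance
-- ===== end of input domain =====

-- B sorts the products by family once and scans the sorted list run by run (a run = a maximal
-- block of equal family), emitting a row exactly for runs of length 1; A instead builds a Counter
-- and makes a second pass over all products. Objective: alternative (same asymptotic cost).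

-- shared helpers: both Pythons compute str(product.get("product_family") or "unknown"),
-- and build the row f"{family}: {product['id']}" (getD "" is only reached outside Pre_, where
-- both Pythons raise KeyError)
def pvFam (p : List (String × String)) : String :=
  match (PySem.Dict.mk p).get? "product_family" with
  | none => "unknown"
  | some v => if v = "" then "unknown" else v

def pvRow (p : List (String × String)) : String :=
  pvFam p ++ ": " ++ ((PySem.Dict.mk p).get? "id").getD ""

-- ===== PORT A =====
def singleton_family_rows_py (products : List (List (String × String))) : List String :=
  let counts := PySem.Dict.counter (products.map pvFam)
  let findings := products.foldl (fun acc product =>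
    if counts.getD (pvFam product) 0 ≠ 1 then acc
    else acc ++ [pvRow product]) []
  PySem.List.sorted findings (fun x => x) false

-- ===== PORT B =====
-- the inner while-loop of Source B: split off the run of the head's family, emit for length-1 runs
def pvRuns : List (List (String × String)) → List String
  | [] => []
  | p :: rest =>
    (if (rest.takeWhile (fun q => pvFam q == pvFam p)).isEmpty then [pvRow p] else [])
      ++ pvRuns (rest.dropWhile (fun q => pvFam q == pvFam p))
termination_by l => l.length
decreasing_by
  exact Nat.lt_succ_of_le (List.Sublist.length_le (List.dropWhile_sublist _))

def singleton_family_rows_py_alt (products : List (List (String × String))) : List String :=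
  PySem.List.sorted (pvRuns (PySem.List.sorted products pvFam false)) (fun x => x) false

-- ===== PRECONDITION & SPEC =====
-- Pre_ excludes inputs where a product of a singleton family has no "id" key: there Python A
-- (and Python B alike) raises KeyError, so no return value is claimed.
def Pre_singleton_family_rows_py (products : List (List (String × String))) : Prop :=
  ∀ p ∈ products, (products.map pvFam).count (pvFam p) = 1 →
    ((PySem.Dict.mk p).get? "id").isSome = true
instance (products : List (List (String × String))) : Decidable (Pre_singleton_family_rows_py products) := by unfold Pre_singleton_family_rows_py; infer_instance
def pvWitness_singleton_family_rows_py : (List (List (String × String))) :=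
  [[("product_family", "a"), ("id", "1")], [("product_family", "b")], [("product_family", "b")]]

def Spec_singleton_family_rows_py (products : List (List (String × String))) (out : List String) : Prop := out = singleton_family_rows_py_alt products
instance (products : List (List (String × String))) (out : List String) : Decidable (Spec_singleton_family_rows_py products out) := by unfold Spec_singleton_family_rows_py; infer_instance

-- ===== CLAIM (what is proved, stated in full; the proofs are below) =====
def Claim_equal_singleton_family_rows_py : Prop := ∀ (products : List (List (String × String))), Dom_singleton_family_rows_py products → Pre_singleton_family_rows_py products → Spec_singleton_family_rows_py products (singleton_family_rows_py products)

-- ===== LEMMAS AND PROOFS =====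

-- on a list sorted by family, the run-scan emits exactly one row per product whose family
-- occurs once in the whole list
theorem pvRuns_eq (s : List (List (String × String)))
    (hs : s.Pairwise (fun a b => pvFam a ≤ pvFam b)) :
    pvRuns s
      = (s.filter (fun p => decide ((s.map pvFam).count (pvFam p) = 1))).map pvRow := by
  induction s using pvRuns.induct with
  | case1 => simp [pvRuns]
  | case2 p rest ih =>
    have hpair_rest : rest.Pairwise (fun a b => pvFam a ≤ pvFam b) :=
      (List.pairwise_cons.mp hs).2
    have hle : ∀ q ∈ rest, pvFam p ≤ pvFam q := (List.pairwise_cons.mp hs).1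
    set f := pvFam p with hf
    set t := rest.takeWhile (fun q => pvFam q == f) with htdef
    set d := rest.dropWhile (fun q => pvFam q == f) with hddef
    have hrest : t ++ d = rest := List.takeWhile_append_dropWhile
    have hdsub : d.Sublist rest := List.dropWhile_sublist _
    have hdp : d.Pairwise (fun a b => pvFam a ≤ pvFam b) :=
      List.Pairwise.sublist hdsub hpair_rest
    have ht : ∀ q ∈ t, pvFam q = f := by
      intro q hq
      simpa using List.mem_takeWhile_imp hq
    have hd : ∀ q ∈ d, pvFam q ≠ f := by
      cases hdd : d with
      | nil => simp
      | cons x xs =>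
        intro q hq
        have hx : pvFam x ≠ f := by
          have h2 := List.head?_dropWhile_not (fun q => pvFam q == f) rest
          rw [← hddef, hdd] at h2
          simpa using h2
        have hxr : x ∈ rest := hdsub.mem (by rw [hdd]; simp)
        have hfx : f < pvFam x := lt_of_le_of_ne (hle x hxr) (Ne.symm hx)
        rcases List.mem_cons.mp hq with rfl | hq'
        · exact hx
        · have hxq : pvFam x ≤ pvFam q := by
            have := hdp
            rw [hdd] at this
            exact (List.pairwise_cons.mp this).1 q hq'
          exact fun hc => absurd hc.symm (ne_of_lt (lt_of_lt_of_le hfx hxq))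
    have hmapS : (p :: rest).map pvFam = f :: (t.map pvFam ++ d.map pvFam) := by
      rw [← hrest]; simp [hf]
    have hcount_t : ∀ g : String, g ≠ f → (t.map pvFam).count g = 0 := by
      intro g hg
      rw [List.count_eq_zero]
      intro hmem
      rcases List.mem_map.mp hmem with ⟨q, hq, rfl⟩
      exact hg (ht q hq)
    have hcount_d0 : (d.map pvFam).count f = 0 := by
      rw [List.count_eq_zero]
      intro hmem
      rcases List.mem_map.mp hmem with ⟨q, hq, hq2⟩
      exact hd q hq hq2
    have hcount_tf : (t.map pvFam).count f = t.length := by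
      have hall : ∀ g ∈ t.map pvFam, f = g := by
        intro g hg
        rcases List.mem_map.mp hg with ⟨q, hq, rfl⟩
        exact (ht q hq).symm
      calc (t.map pvFam).count f = (t.map pvFam).length := List.count_eq_length.mpr hall
        _ = t.length := by simp
    have hcountf : ((p :: rest).map pvFam).count f = 1 + t.length := by
      rw [hmapS, List.count_cons_self, List.count_append, hcount_tf, hcount_d0]
      omega
    have hcountd : ∀ q ∈ d, ((p :: rest).map pvFam).count (pvFam q)
        = (d.map pvFam).count (pvFam q) := by
      intro q hq
      rw [hmapS]
      simp [List.count_cons, List.count_append, hcount_t _ (hd q hq)]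
      exact fun hc => (hd q hq) hc.symm
    have hih : pvRuns d = (d.filter (fun q => decide ((d.map pvFam).count (pvFam q) = 1))).map pvRow :=
      ih hdp
    set P : List (String × String) → Bool :=
      fun q => decide ((((p :: rest).map pvFam).count (pvFam q)) = 1) with hP
    have hfilter_d : d.filter P
        = d.filter (fun q => decide ((d.map pvFam).count (pvFam q) = 1)) := by
      apply List.filter_congr
      intro q hq
      simp only [hP]
      rw [hcountd q hq]
    have hfilter_t : t.filter P = [] := by
      rw [List.filter_eq_nil_iff]
      intro q hq
      have hq1 : pvFam q = f := ht q hq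
      have hlen := List.length_pos_of_mem hq
      simp only [hP, hq1, hcountf, decide_eq_true_eq]
      omega
    have hsplit : rest.filter P = t.filter P ++ d.filter P := by
      rw [← hrest, List.filter_append]
    rw [pvRuns, ← hf, ← htdef, ← hddef]
    rw [List.filter_cons, hsplit, hfilter_t, hfilter_d, List.nil_append]
    by_cases hte : t.isEmpty
    · have ht0 : t.length = 0 := by simpa [List.isEmpty_iff_length_eq_zero] using hte
      have hPp : P p = true := by
        simp only [hP, ← hf, hcountf, ht0, decide_eq_true_eq]
      simp [hte, hPp, hih]
    · have ht1 : 0 < t.length := by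
        rcases Nat.eq_zero_or_pos t.length with h0 | h
        · exact absurd (by simpa [List.isEmpty_iff_length_eq_zero] using h0) hte
        · exact h
      have hPp : P p = false := by
        simp only [hP, ← hf, hcountf, decide_eq_false_iff_not]
        omega
      simp [hte, hPp, hih]

theorem pv_findings_eq (products : List (List (String × String))) :
    singleton_family_rows_py products = singleton_family_rows_py_alt products := by
  unfold singleton_family_rows_py singleton_family_rows_py_alt
  dsimp only
  -- A side: the loop is a filter-then-map, and the Counter lookup is a count
  rw [show (fun (acc : List String) (product : List (String × String)) =>
        if (PySem.Dict.counter (products.map pvFam)).getD (pvFam product) 0 ≠ 1 then acc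
        else acc ++ [pvRow product])
      = (fun acc product =>
        if (fun p => decide ((products.map pvFam).count (pvFam p) = 1)) product
        then acc ++ [pvRow product] else acc) from by
    funext acc p
    rw [ite_not, PySem.Dict.getD_counter]
    simp]
  rw [PySem.List.foldl_append_if, List.nil_append]
  -- B side: reduce the run scan to the same filter-map, up to permutation
  set s := PySem.List.sorted products pvFam false with hsdef
  have hperm : s.Perm products := PySem.List.sorted_perm products pvFam false
  have hpermmap : (s.map pvFam).Perm (products.map pvFam) := hperm.map pvFam
  rw [pvRuns_eq s (PySem.List.sorted_pairwise products pvFam)]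
  rw [show (fun (p : List (String × String)) => decide ((s.map pvFam).count (pvFam p) = 1))
      = (fun p => decide ((products.map pvFam).count (pvFam p) = 1)) from by
    funext p
    rw [hpermmap.count_eq]]
  apply (PySem.List.sorted_id_eq_sorted_id_iff_perm _ _).mpr
  exact ((hperm.filter _).map pvRow).symm

-- ===== VERDICT (by name: the statement is the Claim_ definition above) =====
theorem singleton_family_rows_py_spec : Claim_equal_singleton_family_rows_py := by
  intro products _ _
  unfold Spec_singleton_family_rows_py
  exact pv_findings_eq products
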